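-- pv_equiv track=rewrite | github.com/dhumindesai/Problem-Solving | misc/snapsheet/featured_product.py | featuredProduct
-- ===== SOURCE A (Python) =====
-- def featuredProduct(products):
--     # count frequenencies of the purchased products
--     purchase_freq = {}
--     for product in products:
--         if product in purchase_freq:
--             purchase_freq[product] += 1
--         else:
--             purchase_freq[product] = 1
--
--     result = None
--     current_freq = 0
--     # find the max frequency
--     for item, freq in purchase_freq.items():
--         if freq > current_freq:
--             result = item
--             current_freq = freq
--         elif freq == current_freq:
--             result = max(result, item)
--
--     return result
-- ===== SOURCE B (Python) =====
-- def featuredProduct(products):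
--     freq = {}
--     for p in products:
--         freq[p] = freq.get(p, 0) + 1
--     items = sorted(freq.items(), key=lambda kv: (kv[1], kv[0]))
--     return items[-1][0] if items else None
-- ===== Notes on version B (the rewrite author's own statement) =====
-- stated objective: idiomatic
-- what changed: Replaces A's fused best-so-far scan (tracking result and current_freq with an explicit tie branch) by sorting the count items ascending by the key (freq, product) and returning the last item's product, with an explicit None for empty input.
import Mathlib
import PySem

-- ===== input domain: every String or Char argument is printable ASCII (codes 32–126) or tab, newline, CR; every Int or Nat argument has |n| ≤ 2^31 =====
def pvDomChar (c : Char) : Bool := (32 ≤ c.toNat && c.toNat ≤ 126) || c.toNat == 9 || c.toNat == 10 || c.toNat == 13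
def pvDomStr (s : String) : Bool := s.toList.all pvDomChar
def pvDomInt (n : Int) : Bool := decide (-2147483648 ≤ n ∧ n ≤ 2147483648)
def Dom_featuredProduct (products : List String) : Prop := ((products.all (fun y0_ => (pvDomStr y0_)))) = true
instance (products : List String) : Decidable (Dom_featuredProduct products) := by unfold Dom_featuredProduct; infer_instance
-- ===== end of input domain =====

-- B replaces A's fused best-so-far scan with a sort of the count items by (freq, product)
-- and picking the last one (objective: idiomatic; not claimed faster).

-- ===== PORT A =====
def featuredProduct (products : List String) : Option String :=
  let purchase_freq : PySem.Dict String Int := products.foldl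
    (fun d product => if d.contains product then d.modify product 0 (· + 1) else d.insert product 1)
    PySem.Dict.empty
  let st := purchase_freq.items.foldl
    (fun (st : Option String × Int) (kv : String × Int) =>
      if kv.2 > st.2 then (some kv.1, kv.2)
      else if kv.2 = st.2 then
        -- Python computes max(result, item); result = None here would raise TypeError,
        -- which is unreachable: every counted frequency is ≥ 1 > 0 = initial current_freq
        ((match st.1 with | some r => some (max r kv.1) | none => none), st.2)
      else st)
    ((none : Option String), (0 : Int))
  st.1

-- ===== PORT B =====
def featuredProduct_alt (products : List String) : Option String :=
  let freq : PySem.Dict String Int := products.foldl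
    (fun d p => d.insert p (d.getD p 0 + 1)) PySem.Dict.empty
  let items := PySem.List.sorted2 freq.items (fun kv => kv.2) (fun kv => kv.1)
  match items.getLast? with
  | some kv => some kv.1
  | none => none

-- ===== PRECONDITION & SPEC =====
def Spec_featuredProduct (products : List String) (out : Option String) : Prop := out = featuredProduct_alt products
instance (products : List String) (out : Option String) : Decidable (Spec_featuredProduct products out) := by unfold Spec_featuredProduct; infer_instance

-- ===== CLAIM (what is proved, stated in full; the proofs are below) =====
def Claim_equal_featuredProduct : Prop := ∀ (products : List String), Dom_featuredProduct products → Spec_featuredProduct products (featuredProduct products)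

-- ===== LEMMAS AND PROOFS =====

-- the (freq, product) lexicographic key both programs maximise
def pfKey (kv : String × Int) : Lex (Int × String) := toLex (kv.2, kv.1)

-- A's counting loop body is exactly Dict.modify
theorem pf_countA_eq_counter (products : List String) :
    products.foldl
      (fun d product => if d.contains product then d.modify product 0 (· + 1) else d.insert product 1)
      PySem.Dict.empty = PySem.Dict.counter products := by
  rw [PySem.Dict.counter_eq_foldl]
  congr 1
  funext d p
  split
  · rfl
  · rename_i h
    rw [PySem.Dict.modify, PySem.Dict.getD_of_not_contains _ _ (by simpa using h)]
    norm_num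

-- sorting with two keys is sorting by the lexicographic pair key
theorem pf_sorted2_eq_sorted (xs : List (String × Int)) :
    PySem.List.sorted2 xs (fun kv => kv.2) (fun kv => kv.1) =
      PySem.List.sorted xs pfKey := by
  unfold PySem.List.sorted2 PySem.List.sorted
  simp only [if_neg (by decide : ¬ (false = true))]
  congr 1
  funext acc x
  congr 1
  funext a b
  rcases lt_trichotomy a.2 b.2 with h | h | h
  · simp [pfKey, Prod.Lex.lt_iff, h, not_lt_of_gt h]
  · simp [pfKey, Prod.Lex.lt_iff, h]
  · simp [pfKey, Prod.Lex.lt_iff, h, not_lt_of_gt h, ne_of_gt h]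

-- the last element of a (≤ on keys)-pairwise-sorted list is key-maximal
theorem pf_getLast?_max {α κ : Type} [LinearOrder κ] (key : α → κ) :
    ∀ (l : List α), l.Pairwise (fun a b => key a ≤ key b) →
      ∀ y, l.getLast? = some y → ∀ x ∈ l, key x ≤ key y := by
  intro l
  induction l with
  | nil => intro _ y hy; simp at hy
  | cons a t ih =>
    intro hp y hy x hx
    rcases List.pairwise_cons.mp hp with ⟨ha, ht⟩
    cases t with
    | nil =>
      have hxa : x = a := by simpa using hx
      have hya : a = y := by simpa using hy
      rw [hxa, ← hya]
    | cons b t' =>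
      rw [List.getLast?_cons_cons] at hy
      rcases List.mem_cons.mp hx with rfl | hx
      · exact ha y (List.mem_of_getLast? hy)
      · exact ih ht y hy x hx

-- the pairwise-max step A's scan performs once the state is proper
def pfStep (b kv : String × Int) : String × Int :=
  if kv.2 > b.2 then kv else if kv.2 = b.2 then (max b.1 kv.1, b.2) else b

theorem pf_step_bounds (b kv : String × Int) :
    pfKey b ≤ pfKey (pfStep b kv) ∧ pfKey kv ≤ pfKey (pfStep b kv) ∧
      (pfStep b kv = b ∨ pfStep b kv = kv) := by
  unfold pfStep
  split_ifs with h1 h2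
  · exact ⟨le_of_lt (Prod.Lex.lt_iff.mpr (Or.inl h1)), le_refl _, Or.inr rfl⟩
  · refine ⟨Prod.Lex.le_iff.mpr (Or.inr ⟨rfl, le_max_left _ _⟩),
      Prod.Lex.le_iff.mpr (Or.inr ⟨show kv.2 = b.2 from h2, le_max_right _ _⟩), ?_⟩
    rcases max_choice b.1 kv.1 with h | h
    · exact Or.inl (by rw [h])
    · exact Or.inr (by rw [h, ← h2])
  · exact ⟨le_refl _, le_of_lt (Prod.Lex.lt_iff.mpr
      (Or.inl (show kv.2 < b.2 from lt_of_le_of_ne (not_lt.mp h1) h2))), Or.inl rfl⟩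

theorem pf_foldP_max : ∀ (l : List (String × Int)) (b : String × Int),
    (l.foldl pfStep b = b ∨ l.foldl pfStep b ∈ l) ∧
      pfKey b ≤ pfKey (l.foldl pfStep b) ∧ ∀ x ∈ l, pfKey x ≤ pfKey (l.foldl pfStep b) := by
  intro l
  induction l with
  | nil => intro b; exact ⟨Or.inl rfl, le_refl _, by simp⟩
  | cons a t ih =>
    intro b
    obtain ⟨hb, hkvb, _⟩ := pf_step_bounds b a
    obtain ⟨hmem, hle, hall⟩ := ih (pfStep b a)
    simp only [List.foldl_cons]
    refine ⟨?_, le_trans hb hle, ?_⟩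
    · rcases hmem with h | h
      · rw [h]
        rcases pf_step_bounds b a |>.2.2 with h' | h'
        · exact Or.inl h'
        · exact Or.inr (by rw [h']; exact List.mem_cons_self)
      · exact Or.inr (List.mem_cons_of_mem _ h)
    · intro x hx
      rcases List.mem_cons.mp hx with rfl | hx
      · exact le_trans hkvb hle
      · exact hall x hx

-- A's scan from a proper state is the pfStep fold
theorem pf_foldA_some : ∀ (l : List (String × Int)) (r : String) (c : Int),
    l.foldl
      (fun (st : Option String × Int) (kv : String × Int) =>
        if kv.2 > st.2 then (some kv.1, kv.2)
        else if kv.2 = st.2 then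
          ((match st.1 with | some r => some (max r kv.1) | none => none), st.2)
        else st)
      (some r, c)
    = (some (l.foldl pfStep (r, c)).1, (l.foldl pfStep (r, c)).2) := by
  intro l
  induction l with
  | nil => intro r c; rfl
  | cons a t ih =>
    intro r c
    simp only [List.foldl_cons]
    have : (if a.2 > c then ((some a.1 : Option String), a.2)
        else if a.2 = c then ((some (max r a.1) : Option String), c) else (some r, c))
        = (some (pfStep (r, c) a).1, (pfStep (r, c) a).2) := by
      unfold pfStep; split_ifs <;> rfl
    rw [this]
    simpa using ih (pfStep (r, c) a).1 (pfStep (r, c) a).2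

theorem pf_key_antisymm (x y : String × Int) (h1 : pfKey x ≤ pfKey y) (h2 : pfKey y ≤ pfKey x) :
    x = y := by
  obtain ⟨x1, x2⟩ := x
  obtain ⟨y1, y2⟩ := y
  have h : ((x2, x1) : Int × String) = (y2, y1) := congrArg ofLex (le_antisymm h1 h2)
  simp only [Prod.mk.injEq] at h ⊢
  exact ⟨h.2, h.1⟩

-- every item of a counter has frequency ≥ 1
theorem pf_counter_items_pos (products : List String) :
    ∀ x ∈ (PySem.Dict.counter products).items, (1 : Int) ≤ x.2 := by
  intro x hx
  rw [PySem.Dict.items_counter] at hx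
  obtain ⟨k, hk, rfl⟩ := List.mem_map.mp hx
  have : k ∈ products := (PySem.Set.mem_ofList _ _).mp hk
  have : 0 < products.count k := List.count_pos_iff.mpr this
  simpa using this

-- ===== VERDICT (by name: the statement is the Claim_ definition above) =====
theorem featuredProduct_spec : Claim_equal_featuredProduct := by
  intro products _
  unfold Spec_featuredProduct featuredProduct featuredProduct_alt
  simp only [pf_countA_eq_counter, PySem.Dict.foldl_insert_getD_add_one_eq_counter,
    pf_sorted2_eq_sorted]
  rcases hitems : (PySem.Dict.counter products).items with _ | ⟨kv0, tl⟩
  · simp [PySem.List.sorted]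
  · have hpos : ∀ x ∈ kv0 :: tl, (1 : Int) ≤ x.2 := by
      rw [← hitems]; exact pf_counter_items_pos products
    -- A's side: result is some q.1 for the pfStep fold q
    have hk0 : kv0.2 > 0 := lt_of_lt_of_le (by norm_num) (hpos kv0 List.mem_cons_self)
    set q := tl.foldl pfStep (kv0.1, kv0.2) with hq
    have hA : ((kv0 :: tl).foldl
        (fun (st : Option String × Int) (kv : String × Int) =>
          if kv.2 > st.2 then (some kv.1, kv.2)
          else if kv.2 = st.2 then
            ((match st.1 with | some r => some (max r kv.1) | none => none), st.2)
          else st)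
        ((none : Option String), (0 : Int))).1 = some q.1 := by
      simp only [List.foldl_cons, if_pos hk0]
      rw [pf_foldA_some tl kv0.1 kv0.2]
    obtain ⟨hqmem, hqle, hqall⟩ := pf_foldP_max tl (kv0.1, kv0.2)
    have hqmem' : q ∈ kv0 :: tl := by
      rcases hqmem with h | h
      · rw [← hq] at h; rw [h]; exact List.mem_cons_self
      · exact List.mem_cons_of_mem _ h
    have hqub : ∀ x ∈ kv0 :: tl, pfKey x ≤ pfKey q := by
      intro x hx
      rcases List.mem_cons.mp hx with rfl | hx
      · exact hqle
      · exact hqall x hx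
    -- B's side: last of sorted
    have hsne : PySem.List.sorted (kv0 :: tl) pfKey ≠ [] := by
      rw [Ne, PySem.List.sorted_eq_nil_iff]; simp
    rcases hlast : (PySem.List.sorted (kv0 :: tl) pfKey).getLast? with _ | y
    · exact absurd (List.getLast?_eq_none_iff.mp hlast) hsne
    · have hymem : y ∈ kv0 :: tl :=
        (PySem.List.mem_sorted _ _ _ _).mp (List.mem_of_getLast? hlast)
      have hyub : ∀ x ∈ kv0 :: tl, pfKey x ≤ pfKey y := by
        intro x hx
        exact pf_getLast?_max pfKey _ (PySem.List.sorted_pairwise _ _) y hlast x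
          ((PySem.List.mem_sorted _ _ _ _).mpr hx)
      have : q = y := pf_key_antisymm q y (hyub q hqmem') (hqub y hymem)
      simp only [hA, this]
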